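-- pv_equiv track=rewrite | github.com/AshtonVaughan/bountyhound | bountyhound-agent/engine/agents/api_response_analyzer.py | extract_stack_trace
-- ===== SOURCE A (Python) =====
-- def extract_stack_trace(text: str) -> str:
--     """Extract stack trace from response."""
--     lines = text.split('\n')
--
--     stack_lines = []
--     in_stack = False
--
--     for line in lines:
--         if any(indicator in line.lower() for indicator in ['traceback', 'stack trace', 'at line']):
--             in_stack = True
--
--         if in_stack:
--             stack_lines.append(line)
--
--             if len(stack_lines) >= 10:
--                 break
--
--     return '\n'.join(stack_lines)
-- ===== SOURCE B (Python) =====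
-- def extract_stack_trace(text: str) -> str:
--     """Extract stack trace from response."""
--     lines = text.split('\n')
--     start = next((i for i, line in enumerate(lines)
--                   if any(ind in line.lower() for ind in ('traceback', 'stack trace', 'at line'))),
--                  None)
--     if start is None:
--         return ''
--     return '\n'.join(lines[start:start + 10])
-- ===== Notes on version B (the rewrite author's own statement) =====
-- stated objective: simpler
-- what changed: Replaced the stateful in_stack flag with per-line append and length check by a find-first-index step (next over enumerate) followed by one fixed-width slice join of lines[start:start+10].
import Mathlib
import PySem

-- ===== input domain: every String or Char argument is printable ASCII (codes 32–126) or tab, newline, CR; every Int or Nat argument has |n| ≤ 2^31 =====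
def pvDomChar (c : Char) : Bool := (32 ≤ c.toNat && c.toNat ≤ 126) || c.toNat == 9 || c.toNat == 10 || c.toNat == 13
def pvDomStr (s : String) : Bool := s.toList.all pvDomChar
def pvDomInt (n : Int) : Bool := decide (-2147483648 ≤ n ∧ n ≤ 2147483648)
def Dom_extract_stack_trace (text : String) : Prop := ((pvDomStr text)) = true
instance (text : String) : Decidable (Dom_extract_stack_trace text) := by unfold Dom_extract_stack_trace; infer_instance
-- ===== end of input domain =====

-- B replaces A's stateful in_stack flag loop by find-first-trigger-index then one fixed-width slice (simpler decomposition).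

-- ===== PORT A =====
-- the 'any(indicator in line.lower() for indicator in [...])' test, shared verbatim by both Pythons
def pvTrigger (line : String) : Bool :=
  ["traceback", "stack trace", "at line"].any
    (fun ind => PySem.Str.isIn ind (PySem.Str.lower line))

-- A's for-loop over lines with state (stack_lines, in_stack) and the len ≥ 10 break
def pvLoopA : List String → List String → Bool → List String
  | [], stack_lines, _ => stack_lines
  | line :: rest, stack_lines, in_stack =>
    let in_stack := if pvTrigger line then true else in_stack
    if in_stack then
      let stack_lines := stack_lines ++ [line]
      if 10 ≤ stack_lines.length then stack_lines
      else pvLoopA rest stack_lines in_stack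
    else pvLoopA rest stack_lines in_stack

def extract_stack_trace (text : String) : String :=
  let lines := (PySem.Str.split? text "\n").getD []
  PySem.Str.join "\n" (pvLoopA lines [] false)

-- ===== PORT B =====
def extract_stack_trace_alt (text : String) : String :=
  let lines := (PySem.Str.split? text "\n").getD []
  match lines.findIdx? pvTrigger with
  | none => ""
  | some start =>
      PySem.Str.join "\n" (PySem.List.slice lines (some (start : Int)) (some ((start : Int) + 10)))

-- ===== PRECONDITION & SPEC =====
def Spec_extract_stack_trace (text : String) (out : String) : Prop := out = extract_stack_trace_alt text
instance (text : String) (out : String) : Decidable (Spec_extract_stack_trace text out) := by unfold Spec_extract_stack_trace; infer_instance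

-- ===== CLAIM (what is proved, stated in full; the proofs are below) =====
def Claim_equal_extract_stack_trace : Prop := ∀ (text : String), Dom_extract_stack_trace text → Spec_extract_stack_trace text (extract_stack_trace text)

-- ===== LEMMAS AND PROOFS =====

-- once in_stack is true, A just takes the next lines up to a total of 10
lemma pvLoopA_true (lines : List String) : ∀ (acc : List String), acc.length < 10 →
    pvLoopA lines acc true = acc ++ lines.take (10 - acc.length) := by
  induction lines with
  | nil => intro acc h; simp [pvLoopA]
  | cons l rest ih =>
    intro acc h
    simp only [pvLoopA]
    by_cases ht : 10 ≤ (acc ++ [l]).length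
    · simp only [ht, if_true, ite_self]
      have : 10 - acc.length = 1 := by simp at ht ⊢; omega
      simp [this]
    · simp only [ht, if_false, ite_self]
      rw [ih (acc ++ [l]) (by simp at ht ⊢; omega)]
      have : 10 - acc.length = (10 - (acc ++ [l]).length) + 1 := by simp at ht ⊢; omega
      simp [this, List.take_succ_cons]

-- A's loop from the initial state computes "take 10 from the first trigger line", if any
lemma pvLoopA_false (lines : List String) :
    pvLoopA lines [] false =
      match lines.findIdx? pvTrigger with
      | none => []
      | some i => (lines.drop i).take 10 := by
  induction lines with
  | nil => simp [pvLoopA]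
  | cons l rest ih =>
    simp only [pvLoopA, List.findIdx?_cons]
    by_cases ht : pvTrigger l
    · simp only [ht, if_true, List.nil_append, List.length_cons, List.length_nil]
      rw [pvLoopA_true rest [l] (by simp)]
      simp
    · simp only [ht, if_false, Bool.false_eq_true]
      rw [ih]
      cases rest.findIdx? pvTrigger <;> simp

-- ===== VERDICT (by name: the statement is the Claim_ definition above) =====
theorem extract_stack_trace_spec : Claim_equal_extract_stack_trace := by
  intro text _
  unfold Spec_extract_stack_trace extract_stack_trace extract_stack_trace_alt
  dsimp only
  generalize (PySem.Str.split? text "\n").getD [] = lines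
  rw [pvLoopA_false]
  cases h : lines.findIdx? pvTrigger with
  | none => rfl
  | some i =>
    have : ((i : Int) + 10) = ((i : Int) + ((10 : Nat) : Int)) := by norm_num
    simp only [this, PySem.List.slice_natCast_add]
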